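-- pv_equiv track=rewrite | github.com/julienbld/pycado | src/parse.py | get_pyc_objs
-- ===== SOURCE A (Python) =====
-- g_expr_sep = [" ", "(", ")", "+", "-", '*', "/", ","];
--
-- g_prefixes = ["va_", "pt_", "ln_", "ve_", "cs_", "ci_", "el_", \
--                 "sp_", "su_", "so_", "ob_", "fn_", "pa_"]
--
-- def has_pycado_prefix(var):
--   if isinstance(var, str):
--     for pref in g_prefixes:
--       if var.startswith(pref):
--         return True
--   return False
--
-- def get_pyc_objs(a_str):
--   l_current_str = ""
--   l_pyc_objs = []
--   a_str = a_str + " "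
--   for c in a_str:
--     if c in g_expr_sep:
--       if l_current_str != "":
--         if has_pycado_prefix(l_current_str):
--           l_pyc_objs.append(l_current_str)
--         l_current_str = ""
--     else:
--       l_current_str += c
--
--   return l_pyc_objs
-- ===== SOURCE B (Python) =====
-- g_expr_sep = [" ", "(", ")", "+", "-", '*', "/", ","]
--
-- g_prefixes = ["va_", "pt_", "ln_", "ve_", "cs_", "ci_", "el_", \
--                 "sp_", "su_", "so_", "ob_", "fn_", "pa_"]
--
-- def get_pyc_objs(a_str):
--   # Tokenize by slicing between separator positions, then filter in one
--   # comprehension -- no character-by-character string accumulation.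
--   seps = set(g_expr_sep)
--   tokens = []
--   start = 0
--   for i, c in enumerate(a_str):
--     if c in seps:
--       tokens.append(a_str[start:i])
--       start = i + 1
--   tokens.append(a_str[start:])
--   prefs = tuple(g_prefixes)
--   return [t for t in tokens if t != "" and t.startswith(prefs)]
-- ===== Notes on version B (the rewrite author's own statement) =====
-- stated objective: faster
-- what changed: B tokenizes by recording separator positions and slicing the string between them, then filters the token list with a single startswith(tuple) comprehension, instead of A's character-by-character accumulation into a growing current string with an inline flush-and-test at every separator (and A's trailing-space trick).
import Mathlib
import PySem

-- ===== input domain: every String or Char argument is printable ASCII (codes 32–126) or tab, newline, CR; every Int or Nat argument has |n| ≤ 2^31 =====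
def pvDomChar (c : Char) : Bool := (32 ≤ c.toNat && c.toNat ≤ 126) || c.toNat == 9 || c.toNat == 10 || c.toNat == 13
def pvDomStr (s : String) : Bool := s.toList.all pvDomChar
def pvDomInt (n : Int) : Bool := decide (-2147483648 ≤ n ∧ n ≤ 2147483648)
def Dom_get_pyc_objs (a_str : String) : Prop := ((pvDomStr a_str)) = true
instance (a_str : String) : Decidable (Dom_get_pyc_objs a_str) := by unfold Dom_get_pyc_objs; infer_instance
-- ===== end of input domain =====

-- B tokenizes by slicing between separator positions and filters the token list in
-- one comprehension, instead of A's per-character accumulation (objective: faster by a constant factor, measured).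

-- ===== PORT A =====
def gExprSep : List Char := [' ', '(', ')', '+', '-', '*', '/', ',']

def gPrefixes : List String :=
  ["va_", "pt_", "ln_", "ve_", "cs_", "ci_", "el_",
   "sp_", "su_", "so_", "ob_", "fn_", "pa_"]

-- for-loop over g_prefixes with early return True
def hasPycadoPrefix (var : String) : Bool :=
  gPrefixes.any (fun pref => PySem.Str.startswith var pref)

-- the for-loop of A: state (l_current_str, l_pyc_objs)
def loopA : List Char → String → List String → List String
  | [], _, acc => acc
  | c :: rest, cur, acc =>
    if gExprSep.contains c then
      if cur ≠ "" then
        loopA rest "" (if hasPycadoPrefix cur then acc ++ [cur] else acc)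
      else loopA rest cur acc
    else loopA rest (cur.push c) acc

def get_pyc_objs (a_str : String) : List String :=
  loopA (a_str ++ " ").toList "" []

-- ===== PORT B =====
-- the for-loop of B over enumerate(a_str): state (tokens, start)
def loopB (a_str : String) (seps : PySem.Set Char) :
    List (Int × Char) → List String → Int → List String × Int
  | [], toks, start => (toks, start)
  | (i, c) :: rest, toks, start =>
    if PySem.Set.contains seps c then
      loopB a_str seps rest (toks ++ [PySem.Str.slice a_str (some start) (some i)]) (i + 1)
    else loopB a_str seps rest toks start

def get_pyc_objs_alt (a_str : String) : List String :=
  let seps := PySem.Set.ofList gExprSep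
  let r := loopB a_str seps (PySem.List.enumerate a_str.toList 0) [] 0
  let tokens := r.1 ++ [PySem.Str.slice a_str (some r.2) none]
  tokens.filter
    (fun t => (!(t == "")) && gPrefixes.any (fun pref => PySem.Str.startswith t pref))

-- ===== PRECONDITION & SPEC =====
def Spec_get_pyc_objs (a_str : String) (out : List String) : Prop := out = get_pyc_objs_alt a_str
instance (a_str : String) (out : List String) : Decidable (Spec_get_pyc_objs a_str out) := by unfold Spec_get_pyc_objs; infer_instance

-- ===== CLAIM (what is proved, stated in full; the proofs are below) =====
def Claim_equal_get_pyc_objs : Prop := ∀ (a_str : String), Dom_get_pyc_objs a_str → Spec_get_pyc_objs a_str (get_pyc_objs a_str)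

-- ===== LEMMAS AND PROOFS =====

-- the filter predicate of B, named
def predB (t : String) : Bool :=
  (!(t == "")) && gPrefixes.any (fun pref => PySem.Str.startswith t pref)

-- canonical tokenization: tokens of (pend ++ cs) given that pend is already read
def tokAll : List Char → List Char → List (List Char)
  | pend, [] => [pend]
  | pend, c :: cs => if gExprSep.contains c then pend :: tokAll [] cs else tokAll (pend ++ [c]) cs

def keep (ts : List (List Char)) : List String :=
  (ts.map String.ofList).filter predB

theorem keep_cons (t : List Char) (ts : List (List Char)) :
    keep (t :: ts) = (if predB (String.ofList t) then [String.ofList t] else []) ++ keep ts := by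
  simp [keep, List.filter]
  split_ifs with h <;> simp_all

theorem keep_nil_cons (ts : List (List Char)) : keep ([] :: ts) = keep ts := by
  rw [keep_cons]
  norm_num [predB]

theorem seps_contains (c : Char) :
    PySem.Set.contains (PySem.Set.ofList gExprSep) c = gExprSep.contains c := by
  have h : PySem.Set.ofList gExprSep = gExprSep := by decide
  rw [h]
  simp [PySem.Set.contains]

theorem string_ext {s t : String} (h : s.toList = t.toList) : s = t := by
  have := congrArg String.ofList h
  simpa using this

theorem predB_eq_has (cur : String) (h : ¬ cur = "") :
    predB cur = hasPycadoPrefix cur := by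
  simp [predB, hasPycadoPrefix, h]

theorem loopA_spec (cs : List Char) : ∀ (cur : String) (acc : List String),
    loopA (cs ++ [' ']) cur acc = acc ++ keep (tokAll cur.toList cs) := by
  induction cs with
  | nil =>
    intro cur acc
    have hsep : gExprSep.contains ' ' = true := by decide
    by_cases h : cur = ""
    · subst h
      simp only [List.nil_append, loopA, hsep, if_pos, ne_eq, not_true_eq_false, if_false,
        tokAll, String.toList_empty, keep_nil_cons]
      simp [keep]
    · simp only [List.nil_append, loopA, hsep, if_pos, h, ne_eq, not_false_eq_true,
        tokAll, keep]
      simp only [List.map_cons, List.map_nil, String.ofList_toList, List.filter_cons,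
        List.filter_nil, predB_eq_has cur h]
      split_ifs <;> simp
  | cons c cs ih =>
    intro cur acc
    by_cases hs : gExprSep.contains c
    · by_cases h : cur = ""
      · subst h
        simp only [List.cons_append, loopA, hs, if_pos, ne_eq, not_true_eq_false, if_false,
          ih, String.toList_empty, tokAll, keep_nil_cons]
      · simp only [List.cons_append, loopA, hs, if_pos, h, ne_eq, not_false_eq_true, ih]
        rw [tokAll, if_pos hs, keep_cons]
        simp only [String.ofList_toList]
        rw [predB_eq_has cur h]
        split_ifs <;> simp
    · simp only [List.cons_append, loopA, hs, if_neg, Bool.false_eq_true, not_false_eq_true, ih]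
      rw [tokAll, if_neg hs]
      simp

theorem loopB_spec (a : String) (cs : List Char) : ∀ (i0 s : ℕ) (toks : List String),
    s ≤ i0 → a.toList.drop i0 = cs →
    (loopB a (PySem.Set.ofList gExprSep) (PySem.List.enumerate cs (i0 : Int)) toks (s : Int)).1
      ++ [PySem.Str.slice a
            (some (loopB a (PySem.Set.ofList gExprSep)
                     (PySem.List.enumerate cs (i0 : Int)) toks (s : Int)).2) none] =
    toks ++ (tokAll ((a.toList.drop s).take (i0 - s)) cs).map String.ofList := by
  induction cs with
  | nil =>
    intro i0 s toks hsi hdrop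
    have hlen : a.toList.length ≤ i0 := by
      rw [List.drop_eq_nil_iff] at hdrop
      exact hdrop
    have hpend : (a.toList.drop s).take (i0 - s) = a.toList.drop s := by
      apply List.take_of_length_le
      rw [List.length_drop]
      omega
    simp only [PySem.List.enumerate, loopB, tokAll, hpend, List.map]
    congr 2
    apply string_ext
    simp [PySem.List.slice_from_natCast]
  | cons c cs ih =>
    intro i0 s toks hsi hdrop
    have hget : a.toList[i0]? = some c := by
      have h0 : (a.toList.drop i0)[0]? = some c := by rw [hdrop]; rfl
      simpa using h0
    have hdrop' : a.toList.drop (i0 + 1) = cs := by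
      have := congrArg List.tail hdrop
      simpa [List.tail_drop] using this
    have hcast : (i0 : Int) + 1 = ((i0 + 1 : ℕ) : Int) := by push_cast; ring
    rw [PySem.List.enumerate_cons, hcast]
    by_cases hs : gExprSep.contains c
    · simp only [loopB, seps_contains, hs, if_pos]
      rw [hcast]
      rw [ih (i0 + 1) (i0 + 1) _ (le_refl _) hdrop']
      rw [tokAll, if_pos hs]
      simp only [Nat.sub_self, List.take_zero, List.map_cons, List.append_assoc,
        List.singleton_append]
      congr 2
      apply string_ext
      simp [PySem.List.slice_natCast]
    · simp only [loopB, seps_contains, hs, if_neg, Bool.false_eq_true, not_false_eq_true]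
      rw [ih (i0 + 1) s _ (by omega) hdrop']
      rw [tokAll, if_neg hs]
      have h1 : i0 + 1 - s = (i0 - s) + 1 := by omega
      have h2 : (a.toList.drop s)[i0 - s]? = some c := by
        rw [List.getElem?_drop]
        have h3 : s + (i0 - s) = i0 := by omega
        rw [h3, hget]
      rw [h1, List.take_add_one, h2]
      simp

-- ===== VERDICT (by name: the statement is the Claim_ definition above) =====
theorem get_pyc_objs_spec : Claim_equal_get_pyc_objs := by
  intro a _
  unfold Spec_get_pyc_objs get_pyc_objs get_pyc_objs_alt
  have hA : (a ++ " ").toList = a.toList ++ [' '] := by simp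
  rw [hA, loopA_spec]
  have hB := loopB_spec a a.toList 0 0 [] (le_refl _) (by simp)
  simp only [Nat.cast_zero, Nat.sub_zero, List.drop_zero, List.take_zero] at hB
  simp only []
  rw [hB]
  simp only [List.nil_append, String.toList_empty, keep]
  rfl
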